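-- pv_equiv track=rewrite | github.com/facebookresearch/BELA | bela/transforms/joint_el_transform.py | _adjust_mention_offsets_and_lengths
-- ===== SOURCE A (Python) =====
-- from typing import Any, Dict, List, Optional, Tuple
--
-- def _adjust_mention_offsets_and_lengths(
--
--     offsets: List[List[int]],
--     lengths: List[List[int]],
--     insertions: List[List[int]],
-- ) -> Tuple[List[List[int]], List[List[int]]]:
--     new_offsets: List[List[int]] = []
--     new_lengths: List[List[int]] = []
--
--     for example_offsets, example_lengths, example_insertions in zip(
--         offsets, lengths, insertions
--     ):
--         new_example_offsets: List[int] = []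
--         new_example_lengths: List[int] = []
--         # assume that offsets, lengths sorted by offsets/lengths
--         insertion_idx = 0
--         current_shift = 0
--         for offset, length in zip(example_offsets, example_lengths):
--             while (
--                 insertion_idx < len(example_insertions)
--                 and example_insertions[insertion_idx] <= offset
--             ):
--                 current_shift += 1
--                 insertion_idx += 1
--             new_offset = offset + current_shift
--             new_length = length
--             length_insertion_idx = insertion_idx
--             while (
--                 length_insertion_idx < len(example_insertions)
--                 and example_insertions[length_insertion_idx] < offset + length
--             ):
--                 new_length += 1
--                 length_insertion_idx += 1
--             new_example_offsets.append(new_offset)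
--             new_example_lengths.append(new_length)
--
--         new_offsets.append(new_example_offsets)
--         new_lengths.append(new_example_lengths)
--
--     return new_offsets, new_lengths
-- ===== SOURCE B (Python) =====
-- from typing import List, Tuple
--
-- def _adjust_mention_offsets_and_lengths(
--     offsets: List[List[int]],
--     lengths: List[List[int]],
--     insertions: List[List[int]],
-- ) -> Tuple[List[List[int]], List[List[int]]]:
--     # Shrinking-suffix formulation: instead of index counters, keep the suffix of
--     # insertions not yet passed; locate the first insertion beyond each mention with
--     # a first-index search and cut the suffix there; the shift is recovered from the
--     # number of insertions already cut off.
--     new_offsets: List[List[int]] = []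
--     new_lengths: List[List[int]] = []
--     for eo, el, ins in zip(offsets, lengths, insertions):
--         rest = ins
--         no: List[int] = []
--         nl: List[int] = []
--         for o, l in zip(eo, el):
--             k = next((i for i, v in enumerate(rest) if v > o), len(rest))
--             rest = rest[k:]
--             no.append(o + len(ins) - len(rest))
--             nl.append(l + next((i for i, v in enumerate(rest) if v >= o + l), len(rest)))
--         new_offsets.append(no)
--         new_lengths.append(nl)
--     return new_offsets, new_lengths
-- ===== Notes on version B (the rewrite author's own statement) =====
-- stated objective: alternative
-- what changed: A's two index counters (a never-rewinding insertion_idx plus current_shift) and two inner while loops are replaced by a shrinking-suffix formulation: B keeps the not-yet-passed suffix of the insertion list, finds the first insertion beyond each mention with a first-index search (next over enumerate), cuts the suffix there, and recovers the shift from the number of insertions already consumed.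
import Mathlib
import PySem

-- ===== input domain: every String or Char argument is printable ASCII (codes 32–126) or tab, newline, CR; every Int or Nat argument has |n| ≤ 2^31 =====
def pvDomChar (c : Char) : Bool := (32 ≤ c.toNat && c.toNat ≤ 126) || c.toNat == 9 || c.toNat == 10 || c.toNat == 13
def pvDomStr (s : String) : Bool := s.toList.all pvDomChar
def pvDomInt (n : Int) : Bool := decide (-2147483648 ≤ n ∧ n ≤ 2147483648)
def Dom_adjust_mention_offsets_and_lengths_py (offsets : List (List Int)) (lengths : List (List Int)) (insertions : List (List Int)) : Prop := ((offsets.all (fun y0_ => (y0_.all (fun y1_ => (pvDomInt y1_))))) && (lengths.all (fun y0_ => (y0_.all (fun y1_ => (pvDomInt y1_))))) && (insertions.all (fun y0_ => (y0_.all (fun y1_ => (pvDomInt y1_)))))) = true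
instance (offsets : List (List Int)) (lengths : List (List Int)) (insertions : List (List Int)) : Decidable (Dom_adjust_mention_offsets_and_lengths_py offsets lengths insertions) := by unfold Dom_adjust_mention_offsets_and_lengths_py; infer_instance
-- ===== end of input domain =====

-- B replaces A's index-counter two-pointer loops by a shrinking-suffix formulation
-- (first-index searches + suffix cuts, shift recovered from consumed length);
-- objective: alternative, proved equal on the whole domain.

-- ===== PORT A =====
-- one Python `while idx < len(ins) and p(ins[idx]): idx += 1` loop (used twice, with
-- predicates `<= offset` and `< offset + length`); returns the final index
def pvScan (ins : List Int) (p : Int → Bool) (idx : Nat) : Nat :=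
  if h : idx < ins.length then
    if p (ins[idx]'h) then pvScan ins p (idx + 1) else idx
  else idx
termination_by ins.length - idx

-- inner `for offset, length in zip(...)` loop of A, state = (insertion_idx, current_shift)
def pvExampleA (ins : List Int) : List (Int × Int) → Nat → Int → List Int × List Int
  | [], _, _ => ([], [])
  | (o, l) :: rest, idx, shift =>
      let idx' := pvScan ins (fun v => decide (v ≤ o)) idx
      let shift' := shift + ((idx' - idx : Nat) : Int)
      let lenIdx := pvScan ins (fun v => decide (v < o + l)) idx'
      let r := pvExampleA ins rest idx' shift'
      ((o + shift') :: r.1, (l + ((lenIdx - idx' : Nat) : Int)) :: r.2)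

def adjust_mention_offsets_and_lengths_py (offsets : List (List Int)) (lengths : List (List Int)) (insertions : List (List Int)) : List (List Int) × List (List Int) :=
  ((offsets.zip lengths).zip insertions).foldl
    (fun acc t =>
      let r := pvExampleA t.2 (t.1.1.zip t.1.2) 0 0
      (acc.1 ++ [r.1], acc.2 ++ [r.2]))
    ([], [])

-- ===== PORT B =====
-- inner loop of B: `rest` is the not-yet-passed suffix of the insertion list;
-- `next((i for i, v in enumerate(rest) if ...), len(rest))` is List.findIdx
def pvExampleB (insLen : Nat) : List Int → List (Int × Int) → List Int × List Int
  | _, [] => ([], [])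
  | rest, (o, l) :: ps =>
      let k := rest.findIdx (fun v => decide (o < v))
      let rest' := rest.drop k
      let r := pvExampleB insLen rest' ps
      ((o + ((insLen - rest'.length : Nat) : Int)) :: r.1,
       (l + ((rest'.findIdx (fun v => decide (o + l ≤ v)) : Nat) : Int)) :: r.2)

def adjust_mention_offsets_and_lengths_py_alt (offsets : List (List Int)) (lengths : List (List Int)) (insertions : List (List Int)) : List (List Int) × List (List Int) :=
  ((offsets.zip lengths).zip insertions).foldl
    (fun acc t =>
      let r := pvExampleB t.2.length t.2 (t.1.1.zip t.1.2)
      (acc.1 ++ [r.1], acc.2 ++ [r.2]))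
    ([], [])

-- ===== PRECONDITION & SPEC =====
def Spec_adjust_mention_offsets_and_lengths_py (offsets : List (List Int)) (lengths : List (List Int)) (insertions : List (List Int)) (out : List (List Int) × List (List Int)) : Prop := out = adjust_mention_offsets_and_lengths_py_alt offsets lengths insertions
instance (offsets : List (List Int)) (lengths : List (List Int)) (insertions : List (List Int)) (out : List (List Int) × List (List Int)) : Decidable (Spec_adjust_mention_offsets_and_lengths_py offsets lengths insertions out) := by unfold Spec_adjust_mention_offsets_and_lengths_py; infer_instance

-- ===== CLAIM (what is proved, stated in full; the proofs are below) =====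
def Claim_equal_adjust_mention_offsets_and_lengths_py : Prop := ∀ (offsets : List (List Int)) (lengths : List (List Int)) (insertions : List (List Int)), Dom_adjust_mention_offsets_and_lengths_py offsets lengths insertions → Spec_adjust_mention_offsets_and_lengths_py offsets lengths insertions (adjust_mention_offsets_and_lengths_py offsets lengths insertions)

-- ===== LEMMAS AND PROOFS =====

-- the scan-from-idx loop lands idx + (first failure index in the suffix)
theorem pv_scan_findIdx_aux (ins : List Int) (p : Int → Bool) :
    ∀ (k idx : Nat), ins.length - idx ≤ k → idx ≤ ins.length →
      pvScan ins p idx = idx + (ins.drop idx).findIdx (fun v => ! p v) := by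
  intro k
  induction k with
  | zero =>
      intro idx hk hle
      have h : idx = ins.length := by omega
      unfold pvScan
      simp [h]
  | succ n ih =>
      intro idx hk hle
      by_cases hlt : idx < ins.length
      · have hdrop : ins.drop idx = ins[idx] :: ins.drop (idx + 1) :=
          List.drop_eq_getElem_cons hlt
        unfold pvScan
        by_cases hp : p ins[idx] = true
        · simp only [hlt, dif_pos, hp, if_pos]
          rw [ih (idx + 1) (by omega) (by omega), hdrop, List.findIdx_cons]
          simp [hp]
          omega
        · simp only [hlt, dif_pos, hp]
          rw [hdrop, List.findIdx_cons]
          simp [hp]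
      · have h : idx = ins.length := by omega
        unfold pvScan
        simp [h]

theorem pv_scan_findIdx (ins : List Int) (p : Int → Bool) (idx : Nat) (hle : idx ≤ ins.length) :
    pvScan ins p idx = idx + (ins.drop idx).findIdx (fun v => ! p v) :=
  pv_scan_findIdx_aux ins p (ins.length - idx) idx (le_refl _) hle

-- negated guards of A are exactly B's search predicates
theorem pv_not_le (o : Int) : (fun v : Int => ! decide (v ≤ o)) = (fun v : Int => decide (o < v)) := by
  funext v
  by_cases h : v ≤ o <;> simp [h] <;> omega

theorem pv_not_lt (t : Int) : (fun v : Int => ! decide (v < t)) = (fun v : Int => decide (t ≤ v)) := by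
  funext v
  by_cases h : v < t <;> simp [h] <;> omega

-- A's (index, shift) state corresponds to B's suffix state
theorem pv_example_eq (ins : List Int) :
    ∀ (pairs : List (Int × Int)) (idx : Nat) (shift : Int),
      idx ≤ ins.length → shift = (idx : Int) →
      pvExampleA ins pairs idx shift = pvExampleB ins.length (ins.drop idx) pairs := by
  intro pairs
  induction pairs with
  | nil => intro idx shift _ _; rfl
  | cons hd ps ih =>
      intro idx shift hle hshift
      obtain ⟨o, l⟩ := hd
      have hk : pvScan ins (fun v => decide (v ≤ o)) idx
          = idx + (ins.drop idx).findIdx (fun v => decide (o < v)) := by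
        rw [pv_scan_findIdx ins _ idx hle, pv_not_le]
      have hkle : (ins.drop idx).findIdx (fun v => decide (o < v)) ≤ (ins.drop idx).length :=
        List.findIdx_le_length
      have hlen_drop : (ins.drop idx).length = ins.length - idx := List.length_drop
      have hle' : pvScan ins (fun v => decide (v ≤ o)) idx ≤ ins.length := by
        rw [hk]; omega
      have hdd : (ins.drop idx).drop ((ins.drop idx).findIdx (fun v => decide (o < v)))
          = ins.drop (pvScan ins (fun v => decide (v ≤ o)) idx) := by
        rw [List.drop_drop, hk]
      have hlen2 : pvScan ins (fun v => decide (v < o + l)) (pvScan ins (fun v => decide (v ≤ o)) idx)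
          = pvScan ins (fun v => decide (v ≤ o)) idx
            + (ins.drop (pvScan ins (fun v => decide (v ≤ o)) idx)).findIdx (fun v => decide (o + l ≤ v)) := by
        rw [pv_scan_findIdx ins _ _ hle', pv_not_lt]
      have hrec : pvExampleA ins ps (pvScan ins (fun v => decide (v ≤ o)) idx)
            (shift + (((pvScan ins (fun v => decide (v ≤ o)) idx) - idx : Nat) : Int))
          = pvExampleB ins.length (ins.drop (pvScan ins (fun v => decide (v ≤ o)) idx)) ps := by
        apply ih _ _ hle'
        rw [hk, hshift]
        omega
      show pvExampleA ins ((o, l) :: ps) idx shift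
      = pvExampleB ins.length (ins.drop idx) ((o, l) :: ps)
      simp only [pvExampleA, pvExampleB]
      rw [hdd, hrec]
      refine congrArg₂ Prod.mk
        (congrArg₂ List.cons ?_ rfl) (congrArg₂ List.cons ?_ rfl)
      · rw [List.length_drop, hk, hshift]
        omega
      · rw [hlen2]
        omega

-- the outer fold over examples
theorem pv_outer_eq :
    ∀ (triples : List ((List Int × List Int) × List Int)) (accO accL : List (List Int)),
      triples.foldl (fun acc t =>
          let r := pvExampleA t.2 (t.1.1.zip t.1.2) 0 0
          (acc.1 ++ [r.1], acc.2 ++ [r.2])) (accO, accL)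
        = triples.foldl (fun acc t =>
          let r := pvExampleB t.2.length t.2 (t.1.1.zip t.1.2)
          (acc.1 ++ [r.1], acc.2 ++ [r.2])) (accO, accL) := by
  intro triples
  induction triples with
  | nil => intro accO accL; rfl
  | cons t rest ih =>
      intro accO accL
      have hexample : pvExampleA t.2 (t.1.1.zip t.1.2) 0 0
          = pvExampleB t.2.length t.2 (t.1.1.zip t.1.2) := by
        have := pv_example_eq t.2 (t.1.1.zip t.1.2) 0 0 (by omega) rfl
        simpa using this
      simp only [List.foldl_cons, hexample]
      exact ih _ _

-- ===== VERDICT (by name: the statement is the Claim_ definition above) =====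
theorem adjust_mention_offsets_and_lengths_py_spec : Claim_equal_adjust_mention_offsets_and_lengths_py := by
  intro offsets lengths insertions _
  unfold Spec_adjust_mention_offsets_and_lengths_py
  unfold adjust_mention_offsets_and_lengths_py adjust_mention_offsets_and_lengths_py_alt
  exact pv_outer_eq _ [] []
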